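-- pv_equiv track=rewrite | github.com/zchen0211/leet-code | python/numerical/679_24game.py | generate_orders
-- ===== SOURCE A (Python) =====
-- def generate_orders(n):
--     result = [[0]]
--     new_result = []
--     for i in range(1, n+1):
--       new_result = []
--       for sub_list in result:
--           for j in range(i+1):
--               a = [item for item in sub_list]
--               a.insert(j, i)
--               new_result.append(a)
--       result, new_result = new_result, []
--     return result
-- ===== SOURCE B (Python) =====
-- def generate_orders(n):
--     if n <= 0:
--         return [[0]]
--     return [sub[:j] + [n] + sub[j:]
--             for sub in generate_orders(n - 1)
--             for j in range(n + 1)]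
-- ===== Notes on version B (the rewrite author's own statement) =====
-- stated objective: simpler
-- what changed: Replaces the iterative bottom-up loop with explicit new_result accumulators by a recursion on n that builds each order from generate_orders(n-1) with a single flat comprehension using slice splicing instead of copy+insert.
import Mathlib
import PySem

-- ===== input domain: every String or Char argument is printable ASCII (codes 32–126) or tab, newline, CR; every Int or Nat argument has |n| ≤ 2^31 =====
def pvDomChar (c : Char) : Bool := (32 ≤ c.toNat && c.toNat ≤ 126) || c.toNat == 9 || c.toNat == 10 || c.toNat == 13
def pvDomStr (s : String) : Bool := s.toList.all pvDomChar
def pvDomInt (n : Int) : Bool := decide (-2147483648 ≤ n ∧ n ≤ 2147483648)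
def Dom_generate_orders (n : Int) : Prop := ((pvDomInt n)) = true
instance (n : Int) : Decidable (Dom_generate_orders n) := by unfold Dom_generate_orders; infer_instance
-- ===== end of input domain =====

-- B replaces A's iterative accumulator loop by recursion on n with a flat slice-splicing comprehension (simpler decomposition; same cost).


-- ===== PORT A =====
def generate_orders (n : Int) : List (List Int) :=
  (PySem.List.pyRange 1 (n + 1) 1).foldl
    (fun result i =>
      result.foldl
        (fun new_result sub_list =>
          (PySem.List.pyRange 0 (i + 1) 1).foldl
            (fun acc j =>
              let a := sub_list.map (fun item => item)
              acc ++ [PySem.List.insert a j i])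
            new_result)
        [])
    [[0]]

-- ===== PORT B =====
def generate_orders_alt (n : Int) : List (List Int) :=
  if n ≤ 0 then [[0]]
  else
    (generate_orders_alt (n - 1)).flatMap
      (fun sub =>
        (PySem.List.pyRange 0 (n + 1) 1).map
          (fun j => PySem.List.slice sub none (some j) ++ [n] ++ PySem.List.slice sub (some j) none))
termination_by n.toNat
decreasing_by omega

-- ===== PRECONDITION & SPEC =====
def Spec_generate_orders (n : Int) (out : List (List Int)) : Prop := out = generate_orders_alt n
instance (n : Int) (out : List (List Int)) : Decidable (Spec_generate_orders n out) := by unfold Spec_generate_orders; infer_instance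

-- ===== CLAIM (what is proved, stated in full; the proofs are below) =====
def Claim_equal_generate_orders : Prop := ∀ (n : Int), Dom_generate_orders n → Spec_generate_orders n (generate_orders n)

-- ===== LEMMAS AND PROOFS =====

-- every order produced at stage n has n.toNat + 1 elements
lemma alt_length : ∀ (m : Nat) (n : Int), n.toNat = m →
    ∀ sub ∈ generate_orders_alt n, sub.length = n.toNat + 1 := by
  intro m
  induction m with
  | zero =>
    intro n hn sub hsub
    rw [generate_orders_alt, if_pos (by omega : n ≤ 0)] at hsub
    simp at hsub
    simp [hsub, hn]
  | succ k ih =>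
    intro n hn sub hsub
    rw [generate_orders_alt, if_neg (by omega : ¬ n ≤ 0)] at hsub
    simp only [List.mem_flatMap, List.mem_map] at hsub
    obtain ⟨s, hs, j, hj, rfl⟩ := hsub
    have hslen : s.length = (n - 1).toNat + 1 := ih (n - 1) (by omega) s hs
    rw [PySem.List.mem_pyRange_one] at hj
    have h1 : PySem.List.slice s none (some j) = s.take j.toNat :=
      PySem.List.slice_to s hj.1
    have h2 : PySem.List.slice s (some j) none = s.drop j.toNat :=
      PySem.List.slice_from s hj.1
    rw [h1, h2]
    simp [hslen]
    omega

-- agreement, by induction on n.toNat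
lemma main_aux : ∀ (m : Nat) (n : Int), n.toNat = m →
    generate_orders n = generate_orders_alt n := by
  intro m
  induction m with
  | zero =>
    intro n hn
    rw [generate_orders_alt, if_pos (by omega : n ≤ 0)]
    unfold generate_orders
    rw [PySem.List.pyRange_one_eq_nil (by omega : n + 1 ≤ 1)]
    rfl
  | succ k ih =>
    intro n hn
    have hpos : 0 < n := by omega
    rw [generate_orders_alt, if_neg (by omega : ¬ n ≤ 0)]
    unfold generate_orders
    rw [show n + 1 = n + 1 from rfl,
        PySem.List.pyRange_one_succ_right (by omega : (1:Int) ≤ n), List.foldl_append]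
    have hprev : (PySem.List.pyRange 1 ((n - 1) + 1) 1).foldl
        (fun result i =>
          result.foldl
            (fun new_result sub_list =>
              (PySem.List.pyRange 0 (i + 1) 1).foldl
                (fun acc j =>
                  let a := sub_list.map (fun item => item)
                  acc ++ [PySem.List.insert a j i])
                new_result)
            [])
        [[0]] = generate_orders_alt (n - 1) := by
      have := ih (n - 1) (by omega)
      unfold generate_orders at this
      exact this
    rw [show n - 1 + 1 = n by ring] at hprev
    rw [hprev]
    simp only [List.foldl_cons, List.foldl_nil]
    -- the last outer iteration: rewrite the nested append-folds
    have step : ∀ (res : List (List Int)),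
        (∀ sub ∈ res, sub.length = (n - 1).toNat + 1) →
        ∀ (acc0 : List (List Int)),
        res.foldl
          (fun new_result sub_list =>
            (PySem.List.pyRange 0 (n + 1) 1).foldl
              (fun acc j =>
                let a := sub_list.map (fun item => item)
                acc ++ [PySem.List.insert a j n])
              new_result)
          acc0 =
        acc0 ++ res.flatMap (fun sub =>
          (PySem.List.pyRange 0 (n + 1) 1).map
            (fun j => PySem.List.slice sub none (some j) ++ [n] ++ PySem.List.slice sub (some j) none)) := by
      have inner : ∀ (sub : List Int), sub.length = (n - 1).toNat + 1 → ∀ (acc : List (List Int)),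
          (PySem.List.pyRange 0 (n + 1) 1).foldl
            (fun acc j =>
              let a := sub.map (fun item => item)
              acc ++ [PySem.List.insert a j n])
            acc =
          acc ++ (PySem.List.pyRange 0 (n + 1) 1).map
            (fun j => PySem.List.slice sub none (some j) ++ [n] ++ PySem.List.slice sub (some j) none) := by
        intro sub hsublen acc
        rw [PySem.List.foldl_append_singleton_eq_map]
        congr 1
        apply List.map_congr_left
        intro j hj
        rw [PySem.List.mem_pyRange_one] at hj
        have hj0 : 0 ≤ j := hj.1
        have hjlen : j.toNat ≤ sub.length := by
          rw [hsublen]; omega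
        have hins : PySem.List.insert (sub.map (fun item => item)) j n
            = sub.take j.toNat ++ n :: sub.drop j.toNat := by
          rw [List.map_id']
          have hcast : j = ((j.toNat : Nat) : Int) := by omega
          rw [hcast, PySem.List.insert_natCast sub j.toNat n hjlen]
          simp only [Int.toNat_natCast]
        rw [hins, PySem.List.slice_to sub hj0, PySem.List.slice_from sub hj0]
        simp
      intro res
      induction res with
      | nil => intro _ acc0; simp
      | cons x xs ihres =>
        intro hlen acc0
        simp only [List.foldl_cons, List.flatMap_cons]
        rw [inner x (hlen x (by simp)) acc0]
        rw [ihres (fun s hs => hlen s (List.mem_cons_of_mem _ hs)) _]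
        simp
    specialize step (generate_orders_alt (n - 1))
          (fun sub hs => by
            have := alt_length (n - 1).toNat (n - 1) rfl sub hs
            omega) []
    rw [step]
    simp

-- ===== VERDICT (by name: the statement is the Claim_ definition above) =====
theorem generate_orders_spec : Claim_equal_generate_orders := by
  intro n _
  unfold Spec_generate_orders
  exact main_aux n.toNat n rfl
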